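-- pv_equiv track=rewrite | github.com/thehalleyyoung/halley-labs | algebraic-repair-calculus/implementation/arc/sql/predicates.py | _split_logical
-- ===== SOURCE A (Python) =====
-- from typing import (
--     Any,
--     Callable,
--     Dict,
--     FrozenSet,
--     List,
--     Optional,
--     Sequence,
--     Set,
--     Tuple,
--     Union,
-- )
--
-- def _split_logical(sql: str, keyword: str) -> List[str]:
--     """Split SQL by a logical keyword, respecting parentheses."""
--     parts: List[str] = []
--     depth = 0
--     current = []
--     tokens = sql.split()
--     i = 0
--     while i < len(tokens):
--         token = tokens[i]
--         for ch in token: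
--             if ch == "(":
--                 depth += 1
--             elif ch == ")":
--                 depth -= 1
--         if token.upper() == keyword and depth == 0:
--             parts.append(" ".join(current))
--             current = []
--         else:
--             current.append(token)
--         i += 1
--     if current:
--         parts.append(" ".join(current))
--     return [p.strip() for p in parts if p.strip()]
-- ===== SOURCE B (Python) =====
-- from typing import List, Optional
--
--
-- def _split_logical(sql: str, keyword: str) -> List[str]:
--     """Split SQL by a logical keyword, respecting parentheses.
--
--     Recursive decomposition: find the first depth-0 keyword boundary,
--     slice the token list there, and recurse on the remainder.
--     """
--
--     def find_boundary(tokens: List[str], depth: int) -> Optional[int]: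
--         for j, t in enumerate(tokens):
--             depth += sum(1 for c in t if c == "(") - sum(1 for c in t if c == ")")
--             if t.upper() == keyword and depth == 0:
--                 return j
--         return None
--
--     def go(tokens: List[str], depth: int) -> List[List[str]]:
--         j = find_boundary(tokens, depth)
--         if j is None:
--             return [tokens]
--         return [tokens[:j]] + go(tokens[j + 1 :], 0)
--
--     parts = [" ".join(seg).strip() for seg in go(sql.split(), 0)]
--     return [p for p in parts if p]
-- ===== Notes on version B (the rewrite author's own statement) =====
-- stated objective: alternative
-- what changed: A streams tokens once into a running 'current' accumulator with mutable parts; B recursively splits the token list at the first depth-0 keyword boundary found by an index scan, slices out the segments, and joins/strips/filters them afterwards.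
import Mathlib
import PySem

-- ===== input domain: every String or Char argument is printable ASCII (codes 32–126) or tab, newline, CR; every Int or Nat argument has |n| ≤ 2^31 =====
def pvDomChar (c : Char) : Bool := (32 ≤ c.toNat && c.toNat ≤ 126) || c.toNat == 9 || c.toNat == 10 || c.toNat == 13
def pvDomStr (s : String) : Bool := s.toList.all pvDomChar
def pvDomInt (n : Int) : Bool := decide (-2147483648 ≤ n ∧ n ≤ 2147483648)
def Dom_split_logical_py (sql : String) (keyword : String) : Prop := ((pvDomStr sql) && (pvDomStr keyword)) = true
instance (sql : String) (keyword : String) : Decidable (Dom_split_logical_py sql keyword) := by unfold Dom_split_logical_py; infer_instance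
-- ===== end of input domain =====

-- B replaces A's streaming accumulator with recursive split-at-first-boundary plus slicing; objective: alternative decomposition, same cost.


-- ===== PORT A =====
-- the inner 'for ch in token' depth loop of A
def pvDepthA (cs : List Char) (d : Int) : Int :=
  cs.foldl (fun d ch => if ch = '(' then d + 1 else if ch = ')' then d - 1 else d) d

-- one iteration of A's while loop; state = (parts, depth, current)
def pvStepA (keyword : String) (st : List String × Int × List String) (token : String) :
    List String × Int × List String :=
  let depth := pvDepthA token.toList st.2.1
  if PySem.Str.upper token = keyword ∧ depth = 0 then
    (st.1 ++ [PySem.Str.join " " st.2.2], depth, ([] : List String))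
  else
    (st.1, depth, st.2.2 ++ [token])

def split_logical_py (sql : String) (keyword : String) : List String :=
  let tokens := PySem.Str.split₀ sql
  let st := tokens.foldl (pvStepA keyword) ([], 0, [])
  let parts := if st.2.2 ≠ [] then st.1 ++ [PySem.Str.join " " st.2.2] else st.1
  (parts.filter (fun p => PySem.Str.strip p ≠ "")).map PySem.Str.strip

-- ===== PORT B =====
-- Source B: depth += sum(1 for c in t if c == "(") - sum(1 for c in t if c == ")")
def pvDelta (t : String) : Int :=
  ((t.toList.filter (fun c => c == '(')).length : Int) -
    ((t.toList.filter (fun c => c == ')')).length : Int)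

-- Source B's find_boundary: index of the first depth-0 keyword token, None if absent
def pvFindB (keyword : String) : List String → Int → Nat → Option Nat
  | [], _, _ => none
  | t :: ts, depth, j =>
      let depth := depth + pvDelta t
      if PySem.Str.upper t = keyword ∧ depth = 0 then some j
      else pvFindB keyword ts depth (j + 1)

-- termination bound for pvGoB (cited by the port's decreasing_by)
theorem pvFindB_lt (keyword : String) (ts : List String) (d : Int) (j0 j : Nat)
    (h : pvFindB keyword ts d j0 = some j) : j < j0 + ts.length := by
  induction ts generalizing d j0 with
  | nil => simp [pvFindB] at h
  | cons t ts ih =>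
      simp only [pvFindB] at h
      split at h
      · obtain rfl := Option.some.inj h
        simp
      · have := ih _ _ h
        simp only [List.length_cons]
        omega

-- Source B's go: slice off the segment before the first boundary and recurse
def pvGoB (keyword : String) (tokens : List String) (depth : Int) : List (List String) :=
  match h : pvFindB keyword tokens depth 0 with
  | none => [tokens]
  | some j =>
      [PySem.List.slice tokens none (some (j : Int))] ++
        pvGoB keyword (PySem.List.slice tokens (some ((j + 1 : Nat) : Int)) none) 0
termination_by tokens.length
decreasing_by
  have hj := pvFindB_lt keyword tokens depth 0 j h
  rw [PySem.List.slice_from_natCast]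
  simp [List.length_drop]
  omega

def split_logical_py_alt (sql : String) (keyword : String) : List String :=
  let parts := (pvGoB keyword (PySem.Str.split₀ sql) 0).map
      (fun seg => PySem.Str.strip (PySem.Str.join " " seg))
  parts.filter (fun p => p ≠ "")

-- ===== PRECONDITION & SPEC =====
def Spec_split_logical_py (sql : String) (keyword : String) (out : List String) : Prop := out = split_logical_py_alt sql keyword
instance (sql : String) (keyword : String) (out : List String) : Decidable (Spec_split_logical_py sql keyword out) := by unfold Spec_split_logical_py; infer_instance

-- ===== CLAIM (what is proved, stated in full; the proofs are below) =====
def Claim_equal_split_logical_py : Prop := ∀ (sql : String) (keyword : String), Dom_split_logical_py sql keyword → Spec_split_logical_py sql keyword (split_logical_py sql keyword)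

-- ===== LEMMAS AND PROOFS =====

-- reference segmentation both ports are proved equal to
def pvSegs (keyword : String) : List String → Int → List (List String)
  | [], _ => [[]]
  | t :: ts, d =>
      let d' := d + pvDelta t
      if PySem.Str.upper t = keyword ∧ d' = 0 then [] :: pvSegs keyword ts d'
      else
        match pvSegs keyword ts d' with
        | [] => [[t]]
        | s :: r => (t :: s) :: r

def pvPre (cur : List String) : List (List String) → List (List String)
  | [] => [cur]
  | s :: r => (cur ++ s) :: r

def pvF : List (List String) → List String
  | [] => []
  | [s] => if s = [] then [] else [PySem.Str.join " " s]
  | s :: r => PySem.Str.join " " s :: pvF r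

theorem pvSegs_ne_nil (keyword : String) (ts : List String) (d : Int) :
    pvSegs keyword ts d ≠ [] := by
  cases ts with
  | nil => simp [pvSegs]
  | cons t ts =>
      simp only [pvSegs]
      split
      · simp
      · split <;> simp

theorem pvDepthA_eq (cs : List Char) (d : Int) :
    pvDepthA cs d = d + ((cs.filter (fun c => c == '(')).length : Int) -
      ((cs.filter (fun c => c == ')')).length : Int) := by
  induction cs generalizing d with
  | nil => simp [pvDepthA]
  | cons c cs ih =>
      simp only [pvDepthA, List.foldl_cons] at *
      rw [ih]
      by_cases h1 : c = '(' <;> by_cases h2 : c = ')' <;>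
        simp [h1, h2, List.filter_cons] <;> push_cast <;> omega

theorem pvDepthA_delta (t : String) (d : Int) :
    pvDepthA t.toList d = d + pvDelta t := by
  rw [pvDepthA_eq, pvDelta]; ring

theorem pvGoB_eq (k : String) (ts : List String) (d : Int) :
    pvGoB k ts d =
      match pvFindB k ts d 0 with
      | none => [ts]
      | some j =>
          [PySem.List.slice ts none (some (j : Int))] ++
            pvGoB k (PySem.List.slice ts (some ((j + 1 : Nat) : Int)) none) 0 := by
  rw [pvGoB]
  cases hf : pvFindB k ts d 0 <;> simp [hf]

theorem pvFindB_shift (keyword : String) (ts : List String) (d : Int) (j : Nat) :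
    pvFindB keyword ts d j = (pvFindB keyword ts d 0).map (j + ·) := by
  induction ts generalizing d j with
  | nil => simp [pvFindB]
  | cons t ts ih =>
      simp only [pvFindB]
      split
      · simp
      · rw [ih, ih _ 1, Option.map_map]
        congr 1
        funext x
        simp; omega

theorem pvGoB_eq_segs (keyword : String) (ts : List String) (d : Int) :
    pvGoB keyword ts d = pvSegs keyword ts d := by
  induction ts generalizing d with
  | nil =>
      rw [pvGoB_eq]
      simp [pvFindB, pvSegs]
  | cons t ts ih =>
      rw [pvGoB_eq]
      by_cases hb : PySem.Str.upper t = keyword ∧ d + pvDelta t = 0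
      · have hf : pvFindB keyword (t :: ts) d 0 = some 0 := by
          simp [pvFindB, hb]
        rw [hf]
        dsimp only
        have h1 : PySem.List.slice (t :: ts) none (some ((0 : Nat) : Int)) = [] := by
          rw [PySem.List.slice_to_natCast]; simp
        have h2 : PySem.List.slice (t :: ts) (some ((0 + 1 : Nat) : Int)) none = ts := by
          rw [PySem.List.slice_from_natCast]; simp
        rw [h1, h2, ih]
        simp [pvSegs, hb, hb.2]
      · have hf : pvFindB keyword (t :: ts) d 0 =
            (pvFindB keyword ts (d + pvDelta t) 0).map (1 + ·) := by
          simp only [pvFindB, hb, if_neg hb]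
          exact pvFindB_shift keyword ts (d + pvDelta t) 1
        cases hr : pvFindB keyword ts (d + pvDelta t) 0 with
        | none =>
            have hts : pvSegs keyword ts (d + pvDelta t) = [ts] := by
              rw [← ih, pvGoB_eq, hr]
            rw [hf, hr]
            simp [pvSegs, hb, hts]
        | some r =>
            have hts : pvSegs keyword ts (d + pvDelta t) =
                PySem.List.slice ts none (some (r : Int)) ::
                  pvGoB keyword (PySem.List.slice ts (some ((r + 1 : Nat) : Int)) none) 0 := by
              rw [← ih, pvGoB_eq, hr]
              rfl
            rw [hf, hr]
            simp only [Option.map_some]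
            have e1 : PySem.List.slice (t :: ts) none (some ((1 + r : Nat) : Int)) =
                t :: PySem.List.slice ts none (some (r : Int)) := by
              rw [PySem.List.slice_to_natCast, PySem.List.slice_to_natCast]
              rw [show (1 : Nat) + r = r + 1 from by omega]
              simp
            have e2 : PySem.List.slice (t :: ts) (some ((1 + r + 1 : Nat) : Int)) none =
                PySem.List.slice ts (some ((r + 1 : Nat) : Int)) none := by
              rw [PySem.List.slice_from_natCast, PySem.List.slice_from_natCast]
              rw [show (1 : Nat) + r + 1 = (r + 1) + 1 from by omega]
              simp
            rw [e1, e2]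
            simp [pvSegs, hb, hts]

theorem pvFoldA (keyword : String) (ts : List String) (d : Int) (cur parts : List String) :
    (let st := ts.foldl (pvStepA keyword) (parts, d, cur);
      if st.2.2 ≠ [] then st.1 ++ [PySem.Str.join " " st.2.2] else st.1)
    = parts ++ pvF (pvPre cur (pvSegs keyword ts d)) := by
  induction ts generalizing d cur parts with
  | nil =>
      simp only [List.foldl_nil, pvSegs, pvPre, List.append_nil, pvF]
      split <;> simp_all
  | cons t ts ih =>
      simp only [List.foldl_cons]
      have hd : pvStepA keyword (parts, d, cur) t =
          if PySem.Str.upper t = keyword ∧ d + pvDelta t = 0 then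
            (parts ++ [PySem.Str.join " " cur], d + pvDelta t, ([] : List String))
          else (parts, d + pvDelta t, cur ++ [t]) := by
        simp [pvStepA, pvDepthA_delta]
      by_cases hb : PySem.Str.upper t = keyword ∧ d + pvDelta t = 0
      · rw [hd, if_pos hb, ih]
        obtain ⟨s, r, hsr⟩ : ∃ s r, pvSegs keyword ts (d + pvDelta t) = s :: r := by
          cases h : pvSegs keyword ts (d + pvDelta t) with
          | nil => exact absurd h (pvSegs_ne_nil _ _ _)
          | cons s r => exact ⟨s, r, rfl⟩
        rw [hb.2] at hsr
        simp [pvSegs, hb, hb.2, hsr, pvPre, pvF]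
      · rw [hd, if_neg hb, ih]
        obtain ⟨s, r, hsr⟩ : ∃ s r, pvSegs keyword ts (d + pvDelta t) = s :: r := by
          cases h : pvSegs keyword ts (d + pvDelta t) with
          | nil => exact absurd h (pvSegs_ne_nil _ _ _)
          | cons s r => exact ⟨s, r, rfl⟩
        simp [pvSegs, hb, hsr, pvPre, pvF]

theorem pvFilterF (gs : List (List String)) (hgs : gs ≠ []) :
    ((pvF gs).filter (fun p => PySem.Str.strip p ≠ "")).map PySem.Str.strip
      = (gs.map (fun seg => PySem.Str.strip (PySem.Str.join " " seg))).filter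
          (fun p => p ≠ "") := by
  induction gs with
  | nil => simp at hgs
  | cons s r ih =>
      cases r with
      | nil =>
          by_cases hs : s = []
          · subst hs
            have : PySem.Str.strip (PySem.Str.join " " ([] : List String)) = "" := by decide
            simp [pvF, this]
          · simp only [pvF, if_neg hs, List.map_cons, List.map_nil]
            by_cases h : PySem.Str.strip (PySem.Str.join " " s) = "" <;>
              simp [List.filter_cons, h]
      | cons s2 r2 =>
          have hF : pvF (s :: s2 :: r2) = PySem.Str.join " " s :: pvF (s2 :: r2) := rfl
          have ih' := ih (by simp)
          rw [hF]
          simp only [List.map_cons]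
          by_cases h : PySem.Str.strip (PySem.Str.join " " s) = "" <;>
            · simp [List.filter_cons, h]
              simpa [List.filter_cons] using ih'

-- ===== VERDICT (by name: the statement is the Claim_ definition above) =====
theorem split_logical_py_spec : Claim_equal_split_logical_py := by
  intro sql keyword _
  unfold Spec_split_logical_py split_logical_py split_logical_py_alt
  rw [pvGoB_eq_segs]
  have hA := pvFoldA keyword (PySem.Str.split₀ sql) 0 [] []
  simp only [List.nil_append] at hA
  simp only [hA]
  obtain ⟨s, r, hsr⟩ : ∃ s r, pvSegs keyword (PySem.Str.split₀ sql) 0 = s :: r := by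
    cases h : pvSegs keyword (PySem.Str.split₀ sql) 0 with
    | nil => exact absurd h (pvSegs_ne_nil _ _ _)
    | cons s r => exact ⟨s, r, rfl⟩
  rw [hsr]
  have := pvFilterF (s :: r) (by simp)
  simpa [pvPre] using this
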